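-- pv_equiv track=rewrite | github.com/gauravmalhotra3300-hub/payload-encoder-obfuscation-framework | modules/modules/obfuscator.py | escape_sequence_obfuscation
-- ===== SOURCE A (Python) =====
-- def escape_sequence_obfuscation(payload: str) -> str:
--     """Convert payload to escape sequences.
--
--     Args:
--         payload: Input string
--
--     Returns:
--         Obfuscated with escape sequences
--     """
--     result = []
--     for char in payload:
--         if char in ' \n\t\r':
--             result.append(f'\\x{ord(char):02x}')
--         else:
--             result.append(char)
--     return ''.join(result)
-- ===== SOURCE B (Python) =====
-- def escape_sequence_obfuscation(payload: str) -> str: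
--     """Escape the four whitespace chars by four staged global substitutions.
--
--     Correct because no replacement string ('\\x20', '\\x0a', '\\x09', '\\x0d')
--     contains any of the whitespace characters replaced by a later pass, so the
--     passes cannot interfere with each other.
--     """
--     return (payload.replace(' ', '\\x20')
--                    .replace('\n', '\\x0a')
--                    .replace('\t', '\\x09')
--                    .replace('\r', '\\x0d'))
-- ===== Notes on version B (the rewrite author's own statement) =====
-- stated objective: idiomatic
-- what changed: Replaced the explicit per-character if/else loop with list accumulation and join by four staged whole-string str.replace substitutions, one per whitespace character, correct because no replacement string contains a character a later pass rewrites.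
import Mathlib
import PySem

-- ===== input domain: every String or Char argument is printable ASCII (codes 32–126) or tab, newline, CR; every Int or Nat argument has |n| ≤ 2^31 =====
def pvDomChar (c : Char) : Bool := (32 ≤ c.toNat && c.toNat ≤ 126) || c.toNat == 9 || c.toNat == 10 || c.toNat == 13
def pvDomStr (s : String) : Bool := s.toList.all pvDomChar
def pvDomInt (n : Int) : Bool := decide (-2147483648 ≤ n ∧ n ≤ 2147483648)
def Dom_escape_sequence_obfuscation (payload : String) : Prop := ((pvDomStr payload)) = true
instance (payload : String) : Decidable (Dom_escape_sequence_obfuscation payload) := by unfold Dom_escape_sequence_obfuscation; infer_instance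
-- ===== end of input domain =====

-- B replaces A's single per-character if/else loop by four staged whole-string str.replace
-- substitutions, one per whitespace character (idiomatic; same O(n) cost).

-- ===== PORT A =====
-- f'\\x{ord(char):02x}': two-digit lowercase hex of the ordinal, prefixed by '\x'
def pvHexDigit (n : Nat) : Char := if n < 10 then Char.ofNat (48 + n) else Char.ofNat (87 + n)
def pvHex2 (n : Nat) : String := String.ofList ['\\', 'x', pvHexDigit (n / 16), pvHexDigit (n % 16)]

def escape_sequence_obfuscation (payload : String) : String :=
  -- 'char in " \n\t\r"' on a single char is membership in those four chars (exact here)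
  PySem.Str.join "" (payload.toList.foldl (fun result c =>
    result ++ [if c ∈ (" \n\t\r" : String).toList then pvHex2 c.toNat else String.ofList [c]]) [])

-- ===== PORT B =====
-- payload.replace(' ','\\x20').replace('\n','\\x0a').replace('\t','\\x09').replace('\r','\\x0d')
def escape_sequence_obfuscation_alt (payload : String) : String :=
  PySem.Str.replace
    (PySem.Str.replace
      (PySem.Str.replace
        (PySem.Str.replace payload " " "\\x20")
        "\n" "\\x0a")
      "\t" "\\x09")
    "\r" "\\x0d"

-- ===== PRECONDITION & SPEC =====
def Spec_escape_sequence_obfuscation (payload : String) (out : String) : Prop := out = escape_sequence_obfuscation_alt payload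
instance (payload : String) (out : String) : Decidable (Spec_escape_sequence_obfuscation payload out) := by unfold Spec_escape_sequence_obfuscation; infer_instance

-- ===== CLAIM (what is proved, stated in full; the proofs are below) =====
def Claim_equal_escape_sequence_obfuscation : Prop := ∀ (payload : String), Dom_escape_sequence_obfuscation payload → Spec_escape_sequence_obfuscation payload (escape_sequence_obfuscation payload)

-- ===== LEMMAS AND PROOFS =====

theorem pv_intercalate_nil (l : List (List Char)) : List.intercalate [] l = l.flatten := by
  induction l with
  | nil => rfl
  | cons a t ih =>
    cases t with
    | nil => simp [List.intercalate]
    | cons b u =>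
      have : List.intercalate [] (a :: b :: u) = a ++ [] ++ List.intercalate [] (b :: u) := by
        simp [List.intercalate, List.intersperse]
      simp [this, ih]

theorem pv_join_empty (l : List String) :
    PySem.Str.join "" l = String.ofList ((l.map String.toList).flatten) := by
  apply String.toList_inj.mp
  simp [PySem.Str.toList_join, PySem.Chars.join, pv_intercalate_nil]

-- replace.go with a single-character pattern is the obvious flatMap
theorem pv_go_single (c : Char) (new : List Char) :
    ∀ (l : List Char) (fuel : Nat) (acc : List Char), l.length ≤ fuel →
      PySem.Chars.replace.go [c] new fuel l acc
        = acc.reverse ++ l.flatMap (fun a => if a = c then new else [a]) := by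
  intro l
  induction l with
  | nil =>
    intro fuel acc _
    cases fuel <;> simp [PySem.Chars.replace.go]
  | cons c' t ih =>
    intro fuel acc hle
    cases fuel with
    | zero => simp at hle
    | succ f =>
      by_cases h : c' = c
      · subst h
        have hpre : List.isPrefixOf [c'] (c' :: t) = true := by simp [List.isPrefixOf]
        rw [PySem.Chars.replace.go, if_pos hpre]
        have := ih f (new.reverse ++ acc) (by simpa using Nat.le_of_succ_le_succ hle)
        simp [this]
      · have hpre : List.isPrefixOf [c] (c' :: t) = false := by
          simp [List.isPrefixOf]; exact fun hc => (h hc.symm).elim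
        rw [PySem.Chars.replace.go, if_neg (by simp [hpre])]
        have := ih f (c' :: acc) (Nat.le_of_succ_le_succ hle)
        simp [this, h]

theorem pv_replace_single (s : List Char) (c : Char) (new : List Char) :
    PySem.Chars.replace s [c] new = s.flatMap (fun a => if a = c then new else [a]) := by
  rw [PySem.Chars.replace]
  simp [pv_go_single c new s s.length [] (le_refl _)]

-- the composition of the four single-character substitutions, per character
theorem pv_perchar (a : Char) :
    (List.flatMap (fun b =>
       List.flatMap (fun c =>
         List.flatMap (fun d => if d = '\r' then "\\x0d".toList else [d])
           (if c = '\t' then "\\x09".toList else [c]))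
         (if b = '\n' then "\\x0a".toList else [b]))
       (if a = ' ' then "\\x20".toList else [a]))
      = (if a ∈ (" \n\t\r" : String).toList then pvHex2 a.toNat else String.ofList [a]).toList := by
  by_cases h1 : a = ' '
  · subst h1; decide
  by_cases h2 : a = '\n'
  · subst h2; decide
  by_cases h3 : a = '\t'
  · subst h3; decide
  by_cases h4 : a = '\r'
  · subst h4; decide
  have hm : a ∉ (" \n\t\r" : String).toList := by
    rw [show (" \n\t\r" : String).toList = [' ', '\n', '\t', '\r'] from rfl]
    simp [h1, h2, h3, h4]
  simp [h1, h2, h3, h4]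

-- ===== VERDICT (by name: the statement is the Claim_ definition above) =====
theorem escape_sequence_obfuscation_spec : Claim_equal_escape_sequence_obfuscation := by
  intro payload _
  unfold Spec_escape_sequence_obfuscation escape_sequence_obfuscation escape_sequence_obfuscation_alt
  rw [PySem.List.foldl_append_singleton_eq_map, pv_join_empty]
  apply String.toList_inj.mp
  simp only [PySem.Str.toList_replace, String.toList_ofList, List.nil_append,
    List.map_map, Function.comp_def]
  rw [show (" " : String).toList = [' '] from rfl,
      show ("\n" : String).toList = ['\n'] from rfl,
      show ("\t" : String).toList = ['\t'] from rfl,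
      show ("\r" : String).toList = ['\r'] from rfl,
      pv_replace_single, pv_replace_single, pv_replace_single, pv_replace_single]
  simp only [List.flatMap_assoc]
  rw [← List.flatMap_def]
  exact (List.flatMap_congr (fun a _ => pv_perchar a)).symm
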